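-- pv_equiv track=rewrite | github.com/colincwilson/phtrs | phonopy/str_util.py | bigram_tokens
-- ===== SOURCE A (Python) =====
-- _collection = (list, set, tuple)  # disjunctive type
--
-- def bigram_tokens(word, sep=' '):
--     """
--     Get bigram tokens from one word.
--     """
--     if isinstance(word, _collection):
--         toks = []
--         for word_ in word:
--             toks += bigram_tokens(word_, sep)
--         return toks
--     if sep is not None and sep != '':
--         word = word.split(sep)
--     toks = list(zip(word[:-1], word[1:]))
--     return toks
-- ===== SOURCE B (Python) =====
-- def bigram_tokens(word, sep=' '):
--     """Get bigram tokens from one word (single pass with a previous-token accumulator)."""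
--     toks = word.split(sep) if (sep is not None and sep != '') else list(word)
--     out = []
--     prev = None
--     for t in toks:
--         if prev is not None:
--             out.append((prev, t))
--         prev = t
--     return out
-- ===== Notes on version B (the rewrite author's own statement) =====
-- stated objective: alternative
-- what changed: Replaces the two-slices-and-zip construction (word[:-1] zipped with word[1:]) by a single left-to-right pass that carries the previous token in an accumulator and appends one pair per step; the string-argument path needs no recursion so the collection branch is dropped.
import Mathlib
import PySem

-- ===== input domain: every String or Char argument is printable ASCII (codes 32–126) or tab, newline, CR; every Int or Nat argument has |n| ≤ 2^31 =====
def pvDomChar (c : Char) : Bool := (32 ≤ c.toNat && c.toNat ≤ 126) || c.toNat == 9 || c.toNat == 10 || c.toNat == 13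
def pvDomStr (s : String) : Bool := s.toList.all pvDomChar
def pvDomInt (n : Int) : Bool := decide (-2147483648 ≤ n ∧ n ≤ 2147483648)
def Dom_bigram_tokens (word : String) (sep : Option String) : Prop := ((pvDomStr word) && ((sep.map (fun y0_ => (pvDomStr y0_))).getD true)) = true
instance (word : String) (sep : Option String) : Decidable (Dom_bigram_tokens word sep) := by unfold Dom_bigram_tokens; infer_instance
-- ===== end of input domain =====

-- ===== PORT A =====
-- Port of A. The String argument never takes A's collection branch; A splits (when sep
-- is given and non-empty) and zips word[:-1] with word[1:]. Pairs of characters are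
-- represented as 1-char Strings (Python's str elements).
def bigram_tokens (word : String) (sep : Option String) : List (String × String) :=
  match sep with
  | some s =>
    if s ≠ "" then
      let toks := (PySem.Str.split? word s).getD []   -- split? is some here since s ≠ ""
      (PySem.List.slice toks none (some (-1))).zip (PySem.List.slice toks (some 1) none)
    else
      ((PySem.List.slice word.toList none (some (-1))).zip
        (PySem.List.slice word.toList (some 1) none)).map
        (fun p => (String.singleton p.1, String.singleton p.2))
  | none =>
      ((PySem.List.slice word.toList none (some (-1))).zip
        (PySem.List.slice word.toList (some 1) none)).map
        (fun p => (String.singleton p.1, String.singleton p.2))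

-- ===== PORT B =====
-- B: one pass over the tokens carrying the previous token (none = no previous yet).
def pvPairStep {α : Type} (st : List (α × α) × Option α) (t : α) : List (α × α) × Option α :=
  (match st.2 with
   | some p => st.1 ++ [(p, t)]
   | none => st.1, some t)

def pvPairs {α : Type} (toks : List α) : List (α × α) :=
  (toks.foldl pvPairStep ([], none)).1

def bigram_tokens_alt (word : String) (sep : Option String) : List (String × String) :=
  let toks :=
    match sep with
    | some s =>
      if s ≠ "" then (PySem.Str.split? word s).getD []
      else word.toList.map (fun c => String.singleton c)
    | none => word.toList.map (fun c => String.singleton c)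
  pvPairs toks

-- ===== PRECONDITION & SPEC =====
def Spec_bigram_tokens (word : String) (sep : Option String) (out : List (String × String)) : Prop := out = bigram_tokens_alt word sep
instance (word : String) (sep : Option String) (out : List (String × String)) : Decidable (Spec_bigram_tokens word sep out) := by unfold Spec_bigram_tokens; infer_instance

-- ===== CLAIM (what is proved, stated in full; the proofs are below) =====
def Claim_equal_bigram_tokens : Prop := ∀ (word : String) (sep : Option String), Dom_bigram_tokens word sep → Spec_bigram_tokens word sep (bigram_tokens word sep)

-- ===== LEMMAS AND PROOFS =====

lemma pvPairs_go {α : Type} (l : List α) (acc : List (α × α)) (p : α) :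
    (l.foldl pvPairStep (acc, some p)).1 = acc ++ (p :: l).dropLast.zip l := by
  induction l generalizing acc p with
  | nil => simp
  | cons t ts ih =>
    simp only [List.foldl_cons, pvPairStep]
    rw [ih]
    simp [List.dropLast]

lemma pvPairs_eq_zip {α : Type} (l : List α) :
    pvPairs l = l.dropLast.zip l.tail := by
  cases l with
  | nil => rfl
  | cons p ts =>
    unfold pvPairs
    simp only [List.foldl_cons, pvPairStep]
    rw [pvPairs_go]
    simp

lemma map_singleton_pairs (l : List Char) :
    List.map (fun p => (String.singleton p.1, String.singleton p.2)) (l.dropLast.zip l.tail)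
      = (l.map (fun c => String.singleton c)).dropLast.zip (l.map (fun c => String.singleton c)).tail := by
  simp only [← List.map_dropLast, ← List.map_tail, List.zip_map]
  rfl

-- ===== VERDICT (by name: the statement is the Claim_ definition above) =====
theorem bigram_tokens_spec : Claim_equal_bigram_tokens := by
  intro word sep _
  unfold Spec_bigram_tokens bigram_tokens bigram_tokens_alt
  cases sep with
  | none =>
    simp only [pvPairs_eq_zip, PySem.List.slice_to_neg_one, PySem.List.slice_from_one,
      map_singleton_pairs]
  | some s =>
    by_cases hs : s = ""
    · subst hs
      simp only [ne_eq, not_true_eq_false, if_neg, not_false_eq_true,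
        pvPairs_eq_zip, PySem.List.slice_to_neg_one, PySem.List.slice_from_one,
        map_singleton_pairs]
    · simp only [ne_eq, hs, not_false_eq_true, if_true,
        pvPairs_eq_zip, PySem.List.slice_to_neg_one, PySem.List.slice_from_one]
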